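-- pv_equiv track=rewrite | github.com/tony-728/Algorithm | python/programmers/Lev3/징검다리건너기.py | solution
-- ===== SOURCE A (Python) =====
-- def solution(stones, k):
--     answer = 0
--
--     # 최소값을 1로 할 수 있다. 왜냐하면 문제에서 주어진 최소값이 1이기 때문
--     start = min(stones)  # 최소로 건널 수 있는 사람수
--     end = max(stones)  # 최대로 건널 수 있는 사람수
--
--     # 이분탐색
--     while start <= end:
--         mid = (start + end) // 2
--         count = 0
--
--         for stone in stones:
--             # 문제 조건
--             if stone - mid <= 0:
--                 count += 1
--                 # 연속으로 건널 수 없는 값이 k만큼일 때 end 갱신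
--                 if count >= k:
--                     end = mid - 1
--                     break
--             else:
--                 count = 0
--
--         else:
--             start = mid + 1
--
--     else:
--         answer = start
--
--     return answer
-- ===== SOURCE B (Python) =====
-- def solution(stones, k):
--     # Threshold scan instead of binary search: crossing is blocked at the
--     # smallest stone value v such that the stones <= v contain a gap of k
--     # consecutive ones.  Candidate thresholds are the distinct stone values,
--     # scanned in increasing order; if no k-gap can ever form, the crossing is
--     # never blocked and max(stones) + 1, the first count beyond every stone,
--     # is the result.
--     def longest_gap(v):
--         best = run = 0
--         for s in stones:
--             run = run + 1 if s <= v else 0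
--             best = max(best, run)
--         return best
--
--     return next((v for v in sorted(set(stones)) if longest_gap(v) >= k),
--                 max(stones) + 1)
-- ===== Notes on version B (the rewrite author's own statement) =====
-- stated objective: alternative
-- what changed: Replaced A's binary search over the answer (each probe rescanning the list for k consecutive stones below the probe) by a direct scan of the distinct stone values in increasing order, returning the first value whose removal leaves a gap of k consecutive stones (max(stones)+1 when no gap can form).
import Mathlib
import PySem

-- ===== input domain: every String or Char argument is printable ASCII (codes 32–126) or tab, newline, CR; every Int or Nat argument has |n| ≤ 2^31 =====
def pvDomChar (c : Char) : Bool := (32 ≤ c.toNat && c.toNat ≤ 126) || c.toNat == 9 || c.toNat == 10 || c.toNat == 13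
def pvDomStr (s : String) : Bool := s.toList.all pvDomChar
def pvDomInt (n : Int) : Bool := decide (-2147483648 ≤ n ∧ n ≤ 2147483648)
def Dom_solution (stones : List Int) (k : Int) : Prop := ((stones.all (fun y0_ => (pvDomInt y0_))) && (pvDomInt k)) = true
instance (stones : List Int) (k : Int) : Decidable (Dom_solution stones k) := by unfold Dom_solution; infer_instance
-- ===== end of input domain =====

-- B replaces A's binary search over the answer by a single increasing scan over the
-- distinct stone values, returning the first blocking threshold (alternative algorithm).


-- ===== PORT A =====
-- the inner 'for stone in stones' loop: returns true iff it breaks (count reached k)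
def solInner (k v : Int) : List Int → Int → Bool
  | [], _ => false
  | stone :: rest, count =>
    if stone - v ≤ 0 then
      if count + 1 ≥ k then true else solInner k v rest (count + 1)
    else solInner k v rest 0

def solLoop (stones : List Int) (k lo hi : Int) : Int :=
  if _h : lo ≤ hi then
    let mid := PySem.Int.floordiv (lo + hi) 2
    if solInner k mid stones 0 then solLoop stones k lo (mid - 1)
    else solLoop stones k (mid + 1) hi
  else lo
termination_by (hi + 1 - lo).toNat
decreasing_by
  · have := PySem.Int.floordiv_two_mid_bounds _h; omega
  · have := PySem.Int.floordiv_two_mid_bounds _h; omega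

def solution (stones : List Int) (k : Int) : Int :=
  match PySem.List.min? stones (fun x => x), PySem.List.max? stones (fun x => x) with
  | some st, some en => solLoop stones k st en
  | _, _ => 0  -- unreachable under Pre_: min([]) raises ValueError

-- ===== PORT B =====
-- longest_gap(v): longest run of consecutive stones ≤ v
def longestGap (stones : List Int) (v : Int) : Int :=
  (stones.foldl (fun (p : Int × Int) s =>
      let run := if s ≤ v then p.2 + 1 else 0
      (max p.1 run, run)) (0, 0)).1

def solution_alt (stones : List Int) (k : Int) : Int :=
  match (PySem.List.sorted (PySem.Set.ofList stones) (fun x => x)).find?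
      (fun v => decide (longestGap stones v ≥ k)) with
  | some v => v
  | none => (PySem.List.max? stones (fun x => x)).getD 0 + 1

-- ===== PRECONDITION & SPEC =====
-- Pre_ excludes only the empty list, on which A raises ValueError (min([])) and B raises
-- ValueError (max([])).
def Pre_solution (stones : List Int) (_k : Int) : Prop := stones ≠ []
instance (stones : List Int) (k : Int) : Decidable (Pre_solution stones k) := by
  unfold Pre_solution; infer_instance

def pvWitness_solution : List Int × Int := ([2, 4, 5, 3, 2, 1, 4, 2, 5, 1], 3)

def Spec_solution (stones : List Int) (k : Int) (out : Int) : Prop := out = solution_alt stones k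
instance (stones : List Int) (k : Int) (out : Int) : Decidable (Spec_solution stones k out) := by
  unfold Spec_solution; infer_instance

-- ===== CLAIM (what is proved, stated in full; the proofs are below) =====
def Claim_equal_solution : Prop := ∀ (stones : List Int) (k : Int), Dom_solution stones k → Pre_solution stones k → Spec_solution stones k (solution stones k)

-- ===== LEMMAS AND PROOFS =====

-- 'some window of k consecutive stones is entirely ≤ v'
def HasWin (v k : Int) (l : List Int) : Prop :=
  ∃ i : Nat, i + k.toNat ≤ l.length ∧ ∀ x ∈ (l.drop i).take k.toNat, x ≤ v

lemma solInner_iff (k v : Int) (hk : 1 ≤ k) :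
    ∀ (l : List Int) (c : Int), 0 ≤ c →
      (solInner k v l c = true ↔
        (∃ m : Nat, 0 < m ∧ m ≤ l.length ∧ k ≤ c + m ∧ ∀ x ∈ l.take m, x ≤ v) ∨ HasWin v k l) := by
  intro l
  induction l with
  | nil =>
    intro c hc
    simp only [solInner, HasWin]
    constructor
    · intro h; exact absurd h (by simp)
    · rintro (⟨m, hm, hml, _, _⟩ | ⟨i, hi, _⟩)
      · simp at hml; omega
      · simp at hi; omega
  | cons x t ih =>
    intro c hc
    simp only [solInner]
    by_cases hx : x - v ≤ 0
    · simp only [hx, if_true]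
      by_cases hcnt : c + 1 ≥ k
      · simp only [hcnt, if_pos]
        constructor
        · intro _
          left; exact ⟨1, by omega, by simp, by omega, by simp; omega⟩
        · intro _; trivial
      · rw [if_neg hcnt]
        rw [ih (c + 1) (by omega)]
        constructor
        · rintro (⟨m, hm0, hml, hmk, hall⟩ | ⟨i, hi, hall⟩)
          · left
            refine ⟨m + 1, by omega, by simp; omega, by omega, ?_⟩
            intro y hy
            rw [List.take_succ_cons] at hy
            rcases List.mem_cons.1 hy with h | h
            · omega
            · exact hall y h
          · right; exact ⟨i + 1, by simp; omega, by simpa using hall⟩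
        · rintro (⟨m, hm0, hml, hmk, hall⟩ | ⟨i, hi, hall⟩)
          · have hm2 : 2 ≤ m := by omega
            left
            refine ⟨m - 1, by omega, by simp at hml; omega, by omega, ?_⟩
            intro y hy
            apply hall
            obtain ⟨m', rfl⟩ : ∃ m', m = m' + 1 := ⟨m - 1, by omega⟩
            have : List.take (m' + 1 - 1) t = ((x :: t).take (m' + 1)).tail := by
              simp [List.take_succ_cons]
            rw [this] at hy
            exact List.mem_of_mem_tail hy
          · rcases i with _ | i'
            · have hkn2 : 2 ≤ k.toNat := by omega
              left
              refine ⟨k.toNat - 1, by omega, by simp at hi ⊢; omega, by omega, ?_⟩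
              intro y hy
              apply hall
              simp only [List.drop_zero]
              have : (x :: t).take k.toNat = x :: t.take (k.toNat - 1) := by
                obtain ⟨m', hm'⟩ : ∃ m', k.toNat = m' + 1 := ⟨k.toNat - 1, by omega⟩
                rw [hm']; simp [List.take_succ_cons]
              rw [this]
              exact List.mem_cons_of_mem _ hy
            · right; exact ⟨i', by simp at hi; omega, by simpa using hall⟩
    · rw [if_neg hx]
      rw [ih 0 le_rfl]
      have hxv : v < x := by omega
      constructor
      · rintro (⟨m, hm0, hml, hmk, hall⟩ | ⟨i, hi, hall⟩)
        · right
          refine ⟨1, by simp; omega, ?_⟩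
          intro y hy
          apply hall
          simp only [List.drop_one, List.tail_cons] at hy
          have : t.take k.toNat = (t.take m).take k.toNat := by
            rw [List.take_take]; congr 1; omega
          rw [this] at hy
          exact List.mem_of_mem_take hy
        · right; exact ⟨i + 1, by simp; omega, by simpa using hall⟩
      · rintro (⟨m, hm0, hml, hmk, hall⟩ | ⟨i, hi, hall⟩)
        · exfalso
          have : x ∈ (x :: t).take m := by
            obtain ⟨m', rfl⟩ : ∃ m', m = m' + 1 := ⟨m - 1, by omega⟩
            simp [List.take_succ_cons]
          have := hall x this; omega
        · rcases i with _ | i'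
          · exfalso
            have hx0 : x ∈ ((x :: t).drop 0).take k.toNat := by
              simp only [List.drop_zero]
              obtain ⟨m', hm'⟩ : ∃ m', k.toNat = m' + 1 := ⟨k.toNat - 1, by omega⟩
              rw [hm']; simp [List.take_succ_cons]
            have := hall x hx0; omega
          · right; exact ⟨i', by simp at hi; omega, by simpa using hall⟩

lemma solInner_zero_iff (k v : Int) (hk : 1 ≤ k) (l : List Int) :
    solInner k v l 0 = true ↔ HasWin v k l := by
  rw [solInner_iff k v hk l 0 le_rfl]
  constructor
  · rintro (⟨m, hm0, hml, hmk, hall⟩ | h)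
    · refine ⟨0, by simp; omega, ?_⟩
      intro y hy
      apply hall
      simp only [List.drop_zero] at hy
      have : l.take k.toNat = (l.take m).take k.toNat := by
        rw [List.take_take]; congr 1; omega
      rw [this] at hy
      exact List.mem_of_mem_take hy
    · exact h
  · intro h; right; exact h

lemma solInner_nonpos (k v : Int) (hk : k ≤ 0) :
    ∀ (l : List Int) (c : Int), 0 ≤ c →
      (solInner k v l c = true ↔ ∃ x ∈ l, x ≤ v) := by
  intro l
  induction l with
  | nil => intro c hc; simp [solInner]
  | cons x t ih =>
    intro c hc
    simp only [solInner]
    by_cases hx : x - v ≤ 0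
    · rw [if_pos hx, if_pos (by omega)]
      simp only [true_iff]
      exact ⟨x, by simp, by omega⟩
    · rw [if_neg hx, ih 0 le_rfl]
      constructor
      · rintro ⟨y, hy, hyv⟩; exact ⟨y, by simp [hy], hyv⟩
      · rintro ⟨y, hy, hyv⟩
        rcases List.mem_cons.1 hy with rfl | hy'
        · omega
        · exact ⟨y, hy', hyv⟩

lemma hasWin_mono {v v' k : Int} {l : List Int} (h : v ≤ v') : HasWin v k l → HasWin v' k l := by
  rintro ⟨i, hi, hall⟩
  exact ⟨i, hi, fun x hx => le_trans (hall x hx) h⟩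

lemma hasWin_nonpos {v k : Int} {l : List Int} (hk : k ≤ 0) : HasWin v k l := by
  refine ⟨0, by simp; omega, ?_⟩
  intro x hx
  have : k.toNat = 0 := by omega
  simp [this] at hx

lemma gap_iff (k v : Int) :
    ∀ (l : List Int) (b r : Int), 0 ≤ r → r ≤ b →
      (k ≤ (l.foldl (fun (p : Int × Int) s =>
          let run := if s ≤ v then p.2 + 1 else 0
          (max p.1 run, run)) (b, r)).1 ↔
        k ≤ b ∨ (∃ m : Nat, 0 < m ∧ m ≤ l.length ∧ k ≤ r + m ∧ ∀ x ∈ l.take m, x ≤ v) ∨ HasWin v k l) := by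
  intro l
  induction l with
  | nil =>
    intro b r hr hrb
    simp only [List.foldl_nil]
    constructor
    · intro h; left; exact h
    · rintro (h | ⟨m, hm0, hml, _, _⟩ | ⟨i, hi, _⟩)
      · exact h
      · simp at hml; omega
      · simp at hi; omega
  | cons x t ih =>
    intro b r hr hrb
    simp only [List.foldl_cons]
    by_cases hx : x ≤ v
    · rw [if_pos hx]
      rw [ih (max b (r + 1)) (r + 1) (by omega) (by omega)]
      constructor
      · rintro (h | ⟨m, hm0, hml, hmk, hall⟩ | ⟨i, hi, hall⟩)
        · rcases le_max_iff.1 h with h | h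
          · left; exact h
          · right; left; exact ⟨1, by omega, by simp, by omega, by simp; omega⟩
        · right; left
          refine ⟨m + 1, by omega, by simp; omega, by omega, ?_⟩
          intro y hy
          rw [List.take_succ_cons] at hy
          rcases List.mem_cons.1 hy with h | h
          · omega
          · exact hall y h
        · right; right; exact ⟨i + 1, by simp; omega, by simpa using hall⟩
      · rintro (h | ⟨m, hm0, hml, hmk, hall⟩ | ⟨i, hi, hall⟩)
        · left; exact le_max_of_le_left h
        · by_cases hk1 : k ≤ r + 1
          · left; exact le_max_of_le_right hk1
          · have hm2 : 2 ≤ m := by omega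
            right; left
            refine ⟨m - 1, by omega, by simp at hml; omega, by omega, ?_⟩
            intro y hy
            apply hall
            obtain ⟨m', rfl⟩ : ∃ m', m = m' + 1 := ⟨m - 1, by omega⟩
            have : List.take (m' + 1 - 1) t = ((x :: t).take (m' + 1)).tail := by
              simp [List.take_succ_cons]
            rw [this] at hy
            exact List.mem_of_mem_tail hy
        · rcases i with _ | i'
          · by_cases hk1 : k ≤ r + 1
            · left; exact le_max_of_le_right hk1
            · have hkn2 : 2 ≤ k.toNat := by omega
              right; left
              refine ⟨k.toNat - 1, by omega, by simp at hi ⊢; omega, by omega, ?_⟩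
              intro y hy
              apply hall
              simp only [List.drop_zero]
              have : (x :: t).take k.toNat = x :: t.take (k.toNat - 1) := by
                obtain ⟨m', hm'⟩ : ∃ m', k.toNat = m' + 1 := ⟨k.toNat - 1, by omega⟩
                rw [hm']; simp [List.take_succ_cons]
              rw [this]
              exact List.mem_cons_of_mem _ hy
          · right; right; exact ⟨i', by simp at hi; omega, by simpa using hall⟩
    · rw [if_neg hx]
      rw [ih (max b 0) 0 le_rfl (by omega)]
      constructor
      · rintro (h | ⟨m, hm0, hml, hmk, hall⟩ | ⟨i, hi, hall⟩)
        · left; omega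
        · by_cases hk0 : k ≤ 0
          · left; omega
          · right; right
            refine ⟨1, by simp; omega, ?_⟩
            intro y hy
            apply hall
            simp only [List.drop_one, List.tail_cons] at hy
            have : t.take k.toNat = (t.take m).take k.toNat := by
              rw [List.take_take]; congr 1; omega
            rw [this] at hy
            exact List.mem_of_mem_take hy
        · right; right; exact ⟨i + 1, by simp; omega, by simpa using hall⟩
      · rintro (h | ⟨m, hm0, hml, hmk, hall⟩ | ⟨i, hi, hall⟩)
        · left; omega
        · exfalso
          have : x ∈ (x :: t).take m := by
            obtain ⟨m', rfl⟩ : ∃ m', m = m' + 1 := ⟨m - 1, by omega⟩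
            simp [List.take_succ_cons]
          have := hall x this; omega
        · rcases i with _ | i'
          · by_cases hk0 : k ≤ 0
            · left; omega
            · exfalso
              have hx0 : x ∈ ((x :: t).drop 0).take k.toNat := by
                simp only [List.drop_zero]
                obtain ⟨m', hm'⟩ : ∃ m', k.toNat = m' + 1 := ⟨k.toNat - 1, by omega⟩
                rw [hm']; simp [List.take_succ_cons]
              have := hall x hx0; omega
          · right; right; exact ⟨i', by simp at hi; omega, by simpa using hall⟩

lemma gap_iff_hasWin (stones : List Int) (k v : Int) :
    k ≤ longestGap stones v ↔ HasWin v k stones := by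
  rw [longestGap, gap_iff k v stones 0 0 le_rfl le_rfl]
  constructor
  · rintro (h | ⟨m, hm0, hml, hmk, hall⟩ | h)
    · exact hasWin_nonpos (by omega)
    · by_cases hk0 : k ≤ 0
      · exact hasWin_nonpos hk0
      · refine ⟨0, by simp; omega, ?_⟩
        intro y hy
        apply hall
        simp only [List.drop_zero] at hy
        have : stones.take k.toNat = (stones.take m).take k.toNat := by
          rw [List.take_take]; congr 1; omega
        rw [this] at hy
        exact List.mem_of_mem_take hy
    · exact h
  · intro h; right; right; exact h

lemma find?_sorted_min {q : Int → Bool} :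
    ∀ (S : List Int), S.Pairwise (· < ·) → ∀ v0, S.find? q = some v0 →
      ∀ w ∈ S, q w = true → v0 ≤ w := by
  intro S
  induction S with
  | nil => intro _ v0 hf; simp at hf
  | cons a T ih =>
    intro hp v0 hf w hw hq
    by_cases hqa : q a = true
    · rw [List.find?_cons_of_pos hqa] at hf
      obtain rfl : a = v0 := by injection hf
      rcases List.mem_cons.1 hw with rfl | hw'
      · exact le_refl _
      · exact le_of_lt ((List.pairwise_cons.1 hp).1 w hw')
    · rw [List.find?_cons_of_neg hqa] at hf
      rcases List.mem_cons.1 hw with rfl | hw'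
      · exact absurd hq hqa
      · exact ih (List.pairwise_cons.1 hp).2 v0 hf w hw' hq

lemma window_max (stones : List Int) (i kn : Nat) (h1 : 1 ≤ kn) (h2 : i + kn ≤ stones.length) :
    ∃ w, w ∈ (stones.drop i).take kn ∧ ∀ x ∈ (stones.drop i).take kn, x ≤ w := by
  have hlen : ((stones.drop i).take kn).length = kn := by
    simp [List.length_take, List.length_drop]; omega
  have hwne : (stones.drop i).take kn ≠ [] := by
    intro h; rw [h] at hlen; simp at hlen; omega
  obtain ⟨m, hm⟩ : ∃ m, PySem.List.max? ((stones.drop i).take kn) (fun x => x) = some m := by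
    cases hmax : PySem.List.max? ((stones.drop i).take kn) (fun x : Int => x) with
    | none => exact absurd ((PySem.List.max?_eq_none_iff _ _).mp hmax) hwne
    | some m => exact ⟨m, rfl⟩
  exact ⟨m, PySem.List.max?_mem hm, PySem.List.max?_isMax hm⟩

lemma solLoop_eq (stones : List Int) (k M : Int) :
    ∀ fuel : Nat, ∀ lo hi : Int, (hi + 1 - lo).toNat ≤ fuel → lo ≤ M → M ≤ hi + 1 →
      (∀ v, v ≤ hi → (solInner k v stones 0 = true ↔ M ≤ v)) →
      solLoop stones k lo hi = M := by
  intro fuel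
  induction fuel with
  | zero =>
    intro lo hi hf hlo hhi _
    rw [solLoop, dif_neg (by omega)]
    omega
  | succ n ih =>
    intro lo hi hf hlo hhi hP
    rw [solLoop]
    by_cases h : lo ≤ hi
    · rw [dif_pos h]
      have hmid := PySem.Int.floordiv_two_mid_bounds h
      set mid := PySem.Int.floordiv (lo + hi) 2 with hm
      by_cases hs : solInner k mid stones 0 = true
      · rw [if_pos hs]
        rw [hP mid (by omega)] at hs
        exact ih lo (mid - 1) (by omega) hlo (by omega) (fun v hv => hP v (by omega))
      · rw [if_neg hs]
        have : ¬ M ≤ mid := fun hle => hs ((hP mid (by omega)).mpr hle)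
        exact ih (mid + 1) hi (by omega) (by omega) hhi hP
    · rw [dif_neg h]; omega

lemma solution_eq_alt (stones : List Int) (k : Int) (hne : stones ≠ []) :
    solution stones k = solution_alt stones k := by
  obtain ⟨lo, hlo⟩ : ∃ lo, PySem.List.min? stones (fun x => x) = some lo := by
    cases hmin : PySem.List.min? stones (fun x : Int => x) with
    | none => exact absurd ((PySem.List.min?_eq_none_iff _ _).mp hmin) hne
    | some m => exact ⟨m, rfl⟩
  obtain ⟨hi, hhi⟩ : ∃ hi, PySem.List.max? stones (fun x => x) = some hi := by
    cases hmax : PySem.List.max? stones (fun x : Int => x) with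
    | none => exact absurd ((PySem.List.max?_eq_none_iff _ _).mp hmax) hne
    | some m => exact ⟨m, rfl⟩
  have hlohi : lo ≤ hi := PySem.List.max?_isMax hhi _ (PySem.List.min?_mem hlo)
  set S : List Int := PySem.List.sorted (PySem.Set.ofList stones) (fun x => x) with hS
  set q : Int → Bool := fun v => decide (longestGap stones v ≥ k) with hq
  have hSmem : ∀ w, w ∈ S ↔ w ∈ stones := by
    intro w
    rw [hS, PySem.List.mem_sorted, PySem.Set.mem_ofList]
  have hSsort : S.Pairwise (· < ·) := PySem.List.sorted_ofList_pairwise_lt stones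
  have hqw : ∀ w, q w = true ↔ HasWin w k stones := by
    intro w
    rw [hq]
    simp only [ge_iff_le, decide_eq_true_eq]
    exact gap_iff_hasWin stones k w
  -- the bridge: A's inner loop fires at v iff some candidate ≤ v is blocking
  have hbridge : ∀ v, (solInner k v stones 0 = true ↔ ∃ w ∈ S, w ≤ v ∧ q w = true) := by
    intro v
    by_cases hk1 : 1 ≤ k
    · rw [solInner_zero_iff k v hk1 stones]
      constructor
      · rintro ⟨i, hi', hall⟩
        obtain ⟨w, hwmem, hwmax⟩ := window_max stones i k.toNat (by omega) hi'
        refine ⟨w, (hSmem w).mpr (List.mem_of_mem_drop (List.mem_of_mem_take hwmem)),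
          hall w hwmem, (hqw w).mpr ⟨i, hi', hwmax⟩⟩
      · rintro ⟨w, _, hwv, hqw'⟩
        exact hasWin_mono hwv ((hqw w).mp hqw')
    · rw [solInner_nonpos k v (by omega) stones 0 le_rfl]
      constructor
      · rintro ⟨x, hx, hxv⟩
        exact ⟨x, (hSmem x).mpr hx, hxv, (hqw x).mpr (hasWin_nonpos (by omega))⟩
      · rintro ⟨w, hw, hwv, _⟩
        exact ⟨w, (hSmem w).mp hw, hwv⟩
  unfold solution
  rw [hlo, hhi]
  unfold solution_alt
  rw [← hS, ← hq]
  cases hf : S.find? q with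
  | some v0 =>
    have hv0S : v0 ∈ S := List.mem_of_find?_eq_some hf
    have hv0stones : v0 ∈ stones := (hSmem v0).mp hv0S
    have hv0q : q v0 = true := List.find?_some hf
    have hP : ∀ v, solInner k v stones 0 = true ↔ v0 ≤ v := by
      intro v
      rw [hbridge v]
      constructor
      · rintro ⟨w, hw, hwv, hqw'⟩
        exact le_trans (find?_sorted_min S hSsort v0 hf w hw hqw') hwv
      · intro hv
        exact ⟨v0, hv0S, hv, hv0q⟩
    exact solLoop_eq stones k v0 _ lo hi le_rfl
      (PySem.List.min?_isMin hlo _ hv0stones)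
      (by have := PySem.List.max?_isMax hhi _ hv0stones; omega)
      (fun v _ => hP v)
  | none =>
    simp only [Option.getD_some, hhi]
    refine solLoop_eq stones k (hi + 1) _ lo hi le_rfl (by omega) (by omega) ?_
    intro v hv
    constructor
    · intro hP
      obtain ⟨w, hw, hwv, hqw'⟩ := (hbridge v).mp hP
      exact absurd hqw' (List.find?_eq_none.mp hf w hw)
    · intro h; omega

-- ===== VERDICT (by name: the statement is the Claim_ definition above) =====
theorem solution_spec : Claim_equal_solution := by
  intro stones k _hdom hpre
  exact solution_eq_alt stones k hpre
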